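-- pv_equiv track=rewrite | github.com/angelfdezgetino/adaptive-massive-event-detection | Python/event_detection_pipeline.py | extract_runs_from_mask
-- ===== SOURCE A (Python) =====
-- def extract_runs_from_mask(mask):
--     runs = []
--     in_run = False
--     start = None
--     for i, val in enumerate(mask):
--         if val and not in_run:
--             in_run = True
--             start = i
--         elif (not val) and in_run:
--             runs.append((start, i - 1))
--             in_run = False
--     if in_run:
--         runs.append((start, len(mask) - 1))
--     return runs
-- ===== SOURCE B (Python) =====
-- def extract_runs_from_mask(mask):
--     # Span-scan re-implementation: skip falsy stretches, then consume each
--     # maximal truthy span at once and record its (first, last) indices.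
--     runs = []
--     i = 0
--     n = len(mask)
--     while i < n:
--         if mask[i]:
--             j = i + 1
--             while j < n and mask[j]:
--                 j += 1
--             runs.append((i, j - 1))
--             i = j
--         else:
--             i += 1
--     return runs
-- ===== Notes on version B (the rewrite author's own statement) =====
-- stated objective: alternative
-- what changed: Replaces A's in_run/start state machine (one flag-driven pass with a post-loop flush) with a span-scanning loop that skips falsy stretches and consumes each maximal truthy run in an inner scan, appending its boundaries directly.
import Mathlib
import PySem

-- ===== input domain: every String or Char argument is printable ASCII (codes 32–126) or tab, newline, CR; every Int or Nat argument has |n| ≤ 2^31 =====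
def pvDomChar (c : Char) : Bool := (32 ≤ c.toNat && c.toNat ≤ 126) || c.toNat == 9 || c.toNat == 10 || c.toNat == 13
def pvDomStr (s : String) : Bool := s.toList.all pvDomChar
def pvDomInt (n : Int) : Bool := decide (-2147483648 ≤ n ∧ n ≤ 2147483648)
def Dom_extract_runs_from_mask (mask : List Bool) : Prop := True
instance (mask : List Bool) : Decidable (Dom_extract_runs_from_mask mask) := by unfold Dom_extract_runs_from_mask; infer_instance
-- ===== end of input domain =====

-- B replaces A's in_run/start state machine with a span-scanning loop (skip falsy
-- stretches, consume each maximal truthy run at once); objective: alternative.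

-- ===== PORT A =====
-- A's for loop over enumerate(mask) with state (runs, in_run, start), plus the
-- post-loop flush appending (start, len(mask)-1) when still in a run.
def extractGoA (xs : List Bool) (i : Int) (runs : List (Int × Int))
    (in_run : Bool) (start : Int) (n : Int) : List (Int × Int) :=
  match xs with
  | [] => if in_run then runs ++ [(start, n - 1)] else runs
  | v :: rest =>
    if v && !in_run then extractGoA rest (i + 1) runs true i n
    else if !v && in_run then extractGoA rest (i + 1) (runs ++ [(start, i - 1)]) false start n
    else extractGoA rest (i + 1) runs in_run start n

def extract_runs_from_mask (mask : List Bool) : List (Int × Int) :=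
  extractGoA mask 0 [] false 0 (mask.length : Int)

-- ===== PORT B =====
-- inner while of Source B: length of the leading truthy span
def trueRun : List Bool → Nat
  | true :: rest => trueRun rest + 1
  | _ => 0

-- outer while of Source B over the index: skip a falsy element, or consume a whole truthy span
def extractGoB (xs : List Bool) (i : Int) : List (Int × Int) :=
  match xs with
  | [] => []
  | false :: rest => extractGoB rest (i + 1)
  | true :: rest =>
      let k : Nat := trueRun rest
      (i, i + (k : Int)) :: extractGoB (rest.drop k) (i + (k : Int) + 1)
termination_by xs.length
decreasing_by
  all_goals simp [List.length_drop]

def extract_runs_from_mask_alt (mask : List Bool) : List (Int × Int) :=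
  extractGoB mask 0

-- ===== PRECONDITION & SPEC =====
def Spec_extract_runs_from_mask (mask : List Bool) (out : List (Int × Int)) : Prop := out = extract_runs_from_mask_alt mask
instance (mask : List Bool) (out : List (Int × Int)) : Decidable (Spec_extract_runs_from_mask mask out) := by unfold Spec_extract_runs_from_mask; infer_instance

-- ===== CLAIM (what is proved, stated in full; the proofs are below) =====
def Claim_equal_extract_runs_from_mask : Prop := ∀ (mask : List Bool), Dom_extract_runs_from_mask mask → Spec_extract_runs_from_mask mask (extract_runs_from_mask mask)

-- ===== LEMMAS AND PROOFS =====

-- Combined loop invariant: starting out of a run, A's loop produces runs ++ B's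
-- result from i; starting inside a run with start s, A's loop first closes that
-- run at i + trueRun xs - 1 and then continues as B does past that span.
theorem extractGo_inv (xs : List Bool) : ∀ (i : Int) (runs : List (Int × Int)) (s n : Int),
    n = i + (xs.length : Int) →
    (extractGoA xs i runs false s n = runs ++ extractGoB xs i ∧
     extractGoA xs i runs true s n =
       runs ++ [(s, i + (trueRun xs : Int) - 1)] ++ extractGoB (xs.drop (trueRun xs)) (i + (trueRun xs : Int))) := by
  induction xs with
  | nil =>
    intro i runs s n hn
    simp at hn
    constructor
    · simp [extractGoA, extractGoB]
    · simp [extractGoA, extractGoB, trueRun, hn]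
  | cons v rest ih =>
    intro i runs s n hn
    have hn' : n = (i + 1) + (rest.length : Int) := by
      simp at hn; omega
    cases v with
    | false =>
      constructor
      · show extractGoA (false :: rest) i runs false s n = _
        rw [extractGoA]
        rw [if_neg (by simp), if_neg (by simp)]
        rw [(ih (i + 1) runs s n hn').1]
        rw [extractGoB]
      · show extractGoA (false :: rest) i runs true s n = _
        rw [extractGoA]
        rw [if_neg (by simp), if_pos (by simp)]
        rw [(ih (i + 1) (runs ++ [(s, i - 1)]) s n hn').1]
        show _ = runs ++ [(s, i + ((trueRun (false :: rest) : Nat) : Int) - 1)] ++ _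
        rw [show trueRun (false :: rest) = 0 from rfl]
        simp [extractGoB]
    | true =>
      constructor
      · show extractGoA (true :: rest) i runs false s n = _
        rw [extractGoA]
        rw [if_pos (by simp)]
        rw [(ih (i + 1) runs i n hn').2]
        rw [extractGoB]
        rw [show i + 1 + (trueRun rest : Int) - 1 = i + (trueRun rest : Int) from by ring,
            show i + 1 + (trueRun rest : Int) = i + (trueRun rest : Int) + 1 from by ring]
        simp
      · show extractGoA (true :: rest) i runs true s n = _
        rw [extractGoA]
        rw [if_neg (by simp), if_neg (by simp)]
        rw [(ih (i + 1) runs s n hn').2]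
        show _ = runs ++ [(s, i + ((trueRun (true :: rest) : Nat) : Int) - 1)] ++
          extractGoB ((true :: rest).drop (trueRun (true :: rest))) (i + ((trueRun (true :: rest) : Nat) : Int))
        rw [show trueRun (true :: rest) = trueRun rest + 1 from rfl]
        push_cast
        rw [show i + 1 + (trueRun rest : Int) - 1 = i + ((trueRun rest : Int) + 1) - 1 from by ring,
            show i + 1 + (trueRun rest : Int) = i + ((trueRun rest : Int) + 1) from by ring]
        rfl

-- ===== VERDICT (by name: the statement is the Claim_ definition above) =====
theorem extract_runs_from_mask_spec : Claim_equal_extract_runs_from_mask := by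
  intro mask _
  show extract_runs_from_mask mask = extract_runs_from_mask_alt mask
  unfold extract_runs_from_mask extract_runs_from_mask_alt
  rw [(extractGo_inv mask 0 [] 0 (mask.length : Int) (by omega)).1]
  simp
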